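-- pv_equiv track=rewrite | github.com/heeeeee0129/AlgorithmStudy | Week10/2xn타일링.py | solution
-- ===== SOURCE A (Python) =====
-- def solution(n):
--     if n == 1:
--         return 1
--     if n == 2:
--         return 2
--     memo = [0]*(n+1)
--     memo[1] = 1
--     memo[2] = 2
--     for i in range(3, n+1):
--         memo[i] = (memo[i-1]+ memo[i-2])%1000000007
--     return memo[n]
-- ===== SOURCE B (Python) =====
-- def solution(n):
--     M = 1000000007
--     def fd(k):
--         # returns (F(k) % M, F(k+1) % M) via fast doubling
--         if k == 0:
--             return (0, 1)
--         a, b = fd(k // 2)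
--         c = a * (2 * b - a) % M
--         d = (a * a + b * b) % M
--         if k % 2:
--             return (d, (c + d) % M)
--         return (c, d)
--     return fd(n + 1)[0]
-- ===== Notes on version B (the rewrite author's own statement) =====
-- stated objective: faster
-- what changed: replaced the O(n) DP array of Fibonacci values with fast-doubling recursion computing (F(k) mod p, F(k+1) mod p) in O(log n) multiplications
import Mathlib
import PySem

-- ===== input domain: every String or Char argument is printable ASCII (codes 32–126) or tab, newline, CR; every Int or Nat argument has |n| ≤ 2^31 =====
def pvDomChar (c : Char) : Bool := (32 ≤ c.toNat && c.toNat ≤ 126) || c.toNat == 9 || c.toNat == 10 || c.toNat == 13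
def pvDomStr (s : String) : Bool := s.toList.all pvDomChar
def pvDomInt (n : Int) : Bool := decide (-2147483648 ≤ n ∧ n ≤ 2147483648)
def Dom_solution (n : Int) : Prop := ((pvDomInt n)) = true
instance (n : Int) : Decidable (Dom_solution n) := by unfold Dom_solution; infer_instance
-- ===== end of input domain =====

-- B replaces A's O(n) DP array with O(log n) fast-doubling of the Fibonacci pair mod 1e9+7 (faster, asymptotic).


-- ===== PORT A =====
-- loop body of 'for i in range(3, n+1): memo[i] = (memo[i-1] + memo[i-2]) % 1000000007'
def stepA (memo : List Int) (i : Int) : List Int :=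
  memo.set i.toNat (PySem.Int.mod (memo.getD (i-1).toNat 0 + memo.getD (i-2).toNat 0) 1000000007)

def solution (n : Int) : Int :=
  if n = 1 then 1
  else if n = 2 then 2
  else
    let memo := List.replicate (n+1).toNat (0 : Int)
    let memo := memo.set 1 1
    let memo := memo.set 2 2
    let memo := (PySem.List.pyRange 3 (n+1) 1).foldl stepA memo
    memo.getD n.toNat 0

-- ===== PORT B =====
-- fast doubling: fastdbl k = (F(k) mod p, F(k+1) mod p), transliterating Source B's fd
def fastdbl (k : Nat) : Int × Int :=
  if h : k = 0 then (0, 1)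
  else
    let p := fastdbl (k / 2)
    let a := p.1
    let b := p.2
    let c := PySem.Int.mod (a * (2 * b - a)) 1000000007
    let d := PySem.Int.mod (a * a + b * b) 1000000007
    if k % 2 = 1 then (d, PySem.Int.mod (c + d) 1000000007) else (c, d)
decreasing_by exact Nat.div_lt_self (Nat.pos_of_ne_zero h) (by norm_num)

def solution_alt (n : Int) : Int := (fastdbl (n + 1).toNat).1

-- ===== PRECONDITION & SPEC =====
-- Pre_ excludes n ≤ 0, where A raises IndexError ('memo[1] = 1' on a list of length ≤ 1).
def Pre_solution (n : Int) : Prop := 1 ≤ n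
instance (n : Int) : Decidable (Pre_solution n) := by unfold Pre_solution; infer_instance
def pvWitness_solution : Int := 5

def Spec_solution (n : Int) (out : Int) : Prop := out = solution_alt n
instance (n : Int) (out : Int) : Decidable (Spec_solution n out) := by unfold Spec_solution; infer_instance

-- ===== CLAIM (what is proved, stated in full; the proofs are below) =====
def Claim_equal_solution : Prop := ∀ (n : Int), Dom_solution n → Pre_solution n → Spec_solution n (solution n)

-- ===== LEMMAS AND PROOFS =====

lemma pmod (a : Int) : PySem.Int.mod a 1000000007 = a % 1000000007 :=
  PySem.Int.mod_eq_emod_of_pos (by norm_num)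

-- Fibonacci mod p, the common mathematical value both ports compute.
def fm (k : Nat) : Int := (Nat.fib k : Int) % 1000000007

lemma fm_add (k : Nat) : (fm k + fm (k+1)) % 1000000007 = fm (k+2) := by
  unfold fm
  rw [← Int.add_emod, Nat.fib_add_two]
  push_cast
  ring_nf

lemma emod_modeq (M a : Int) : a % M ≡ a [ZMOD M] := Int.emod_emod_of_dvd a dvd_rfl

lemma mod_mul_sub (a b : Int) :
    ((a % 1000000007) * (2 * (b % 1000000007) - a % 1000000007)) % 1000000007
      = (a * (2 * b - a)) % 1000000007 :=
  ((emod_modeq _ a).mul (((Int.ModEq.refl 2).mul (emod_modeq _ b)).sub (emod_modeq _ a)))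

lemma mod_sq_add (a b : Int) :
    ((a % 1000000007) * (a % 1000000007) + (b % 1000000007) * (b % 1000000007)) % 1000000007
      = (a * a + b * b) % 1000000007 :=
  (((emod_modeq _ a).mul (emod_modeq _ a)).add ((emod_modeq _ b).mul (emod_modeq _ b)))

lemma fib_doubling_c (j : Nat) :
    ((fm j) * (2 * fm (j+1) - fm j)) % 1000000007 = fm (2*j) := by
  unfold fm
  rw [mod_mul_sub, Nat.fib_two_mul]
  have h : Nat.fib j ≤ 2 * Nat.fib (j+1) :=
    le_trans (Nat.fib_le_fib_succ) (by omega)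
  push_cast [h]
  ring_nf

lemma fib_doubling_d (j : Nat) :
    ((fm j) * (fm j) + (fm (j+1)) * (fm (j+1))) % 1000000007 = fm (2*j+1) := by
  unfold fm
  rw [mod_sq_add, Nat.fib_two_mul_add_one]
  push_cast
  ring_nf

lemma fastdbl_eq (k : Nat) : fastdbl k = (fm k, fm (k+1)) := by
  induction k using Nat.strong_induction_on with
  | _ k ih =>
    rw [fastdbl]
    by_cases h : k = 0
    · subst h; simp [fm]
    · simp only [h, dif_neg, not_false_iff]
      have hlt : k / 2 < k := Nat.div_lt_self (Nat.pos_of_ne_zero h) (by norm_num)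
      rw [ih _ hlt]
      rcases Nat.even_or_odd k with he | ho
      · obtain ⟨j, hj⟩ := he
        subst hj
        have hk2 : (j + j) / 2 = j := by omega
        have hpar : ¬ ((j + j) % 2 = 1) := by omega
        simp only [pmod, hk2, hpar, if_neg, not_false_iff, Prod.mk.injEq]
        refine ⟨?_, ?_⟩
        · rw [show j + j = 2 * j by ring]
          exact fib_doubling_c j
        · rw [show j + j + 1 = 2 * j + 1 by ring]
          exact fib_doubling_d j
      · obtain ⟨j, hj⟩ := ho
        subst hj
        have hk2 : (2 * j + 1) / 2 = j := by omega
        have hpar : (2 * j + 1) % 2 = 1 := by omega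
        simp only [pmod, hk2, hpar, if_pos, Prod.mk.injEq]
        refine ⟨?_, ?_⟩
        · exact fib_doubling_d j
        · rw [fib_doubling_c j, fib_doubling_d j, fm_add (2*j)]

lemma solution_alt_eq (n : Int) : solution_alt n = fm (n+1).toNat := by
  unfold solution_alt
  rw [fastdbl_eq]

-- ===== A-side loop invariant =====

def memo0 (N : Nat) : List Int := ((List.replicate (N+1) (0:Int)).set 1 1).set 2 2

lemma memo0_length (N : Nat) : (memo0 N).length = N + 1 := by
  simp [memo0]

lemma getD_set_ne (l : List Int) (i j : Nat) (v : Int) (h : i ≠ j) :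
    (l.set i v).getD j 0 = l.getD j 0 := by
  simp [List.getD, List.getElem?_set_ne h]

lemma getD_set_self (l : List Int) (i : Nat) (v : Int) (h : i < l.length) :
    (l.set i v).getD i 0 = v := by
  simp [List.getD, h]

lemma memo0_getD_one (N : Nat) (h : 3 ≤ N) : (memo0 N).getD 1 0 = 1 := by
  unfold memo0
  rw [getD_set_ne _ _ _ _ (by omega)]
  rw [getD_set_self _ _ _ (by simp [List.length_replicate]; omega)]

lemma memo0_getD_two (N : Nat) (h : 3 ≤ N) : (memo0 N).getD 2 0 = 2 := by
  unfold memo0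
  rw [getD_set_self _ _ _ (by simp [List.length_replicate]; omega)]

lemma loop_inv (N : Nat) (hN : 3 ≤ N) :
    ∀ i : Nat, 3 ≤ i → i ≤ N →
      ((PySem.List.pyRange 3 ((i:Int)+1) 1).foldl stepA (memo0 N)).length = N + 1 ∧
      ((PySem.List.pyRange 3 ((i:Int)+1) 1).foldl stepA (memo0 N)).getD (i-1) 0 = fm i ∧
      ((PySem.List.pyRange 3 ((i:Int)+1) 1).foldl stepA (memo0 N)).getD i 0 = fm (i+1) := by
  intro i
  induction i with
  | zero => omega
  | succ i ih =>
    intro h3 hle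
    by_cases hbase : i + 1 = 3
    · -- base case i+1 = 3 : one iteration on memo0
      have hi2 : i = 2 := by omega
      subst hi2
      have h4 : (((2+1 : Nat) : Int) + 1) = 3 + 1 := by norm_num
      rw [h4, PySem.List.pyRange_one_singleton]
      simp only [List.foldl_cons, List.foldl_nil, stepA, pmod, Nat.reduceAdd, Nat.reduceSub,
        Int.reduceSub, Int.reduceToNat]
      rw [memo0_getD_one N hN, memo0_getD_two N hN]
      have hlen0 : (memo0 N).length = N + 1 := memo0_length N
      refine ⟨by rw [List.length_set, hlen0], ?_, ?_⟩
      · rw [getD_set_ne _ _ _ _ (by omega), memo0_getD_two N hN]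
        decide
      · rw [getD_set_self _ _ _ (by omega)]
        decide
    · -- step case
      have h3i : 3 ≤ i := by omega
      have hiN : i ≤ N := by omega
      obtain ⟨hlen, hm1, hm⟩ := ih h3i hiN
      have hrange : PySem.List.pyRange 3 (((i+1 : Nat) : Int) + 1) 1
          = PySem.List.pyRange 3 ((i:Int)+1) 1 ++ [(i:Int)+1] := by
        push_cast
        exact PySem.List.pyRange_one_succ_right (by exact_mod_cast by omega)
      rw [hrange, List.foldl_append]
      set m := (PySem.List.pyRange 3 ((i:Int)+1) 1).foldl stepA (memo0 N) with hm_def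
      simp only [List.foldl_cons, List.foldl_nil, stepA, pmod]
      have e1 : ((i:Int)+1).toNat = i+1 := by omega
      have e2 : ((i:Int)+1-1).toNat = i := by omega
      have e3 : ((i:Int)+1-2).toNat = i-1 := by omega
      rw [e1, e2, e3]
      refine ⟨by rw [List.length_set, hlen], ?_, ?_⟩
      · rw [show i + 1 - 1 = i from rfl, getD_set_ne _ _ _ _ (by omega), hm]
      · rw [getD_set_self _ _ _ (by omega), hm, hm1, add_comm, fm_add i]

lemma solution_eq (n : Int) (h : 1 ≤ n) : solution n = fm (n+1).toNat := by
  by_cases h1 : n = 1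
  · subst h1; norm_num [solution]; decide
  by_cases h2 : n = 2
  · subst h2; norm_num [solution]; decide
  · have h3 : 3 ≤ n := by omega
    obtain ⟨N, hN⟩ : ∃ N : Nat, n = (N : Int) := ⟨n.toNat, by omega⟩
    subst hN
    have hN3 : 3 ≤ N := by exact_mod_cast h3
    unfold solution
    simp only [h1, h2, if_false]
    have hmem : ((List.replicate ((N:Int)+1).toNat (0:Int)).set 1 1).set 2 2 = memo0 N := by
      have : ((N:Int)+1).toNat = N+1 := by omega
      rw [this]; rfl
    obtain ⟨hlen, hm1, hm⟩ := loop_inv N hN3 N hN3 le_rfl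
    have hnt : ((N:Int)).toNat = N := by omega
    rw [hmem, hnt]
    have hout : ((N:Int)+1).toNat = N + 1 := by omega
    rw [hout]
    exact hm

-- ===== VERDICT (by name: the statement is the Claim_ definition above) =====
theorem solution_spec : Claim_equal_solution := by
  intro n _ hpre
  unfold Spec_solution
  rw [solution_alt_eq, solution_eq n hpre]
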